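-- pv_equiv track=rewrite | github.com/VaHerinckx/LifeLog_Project | src/nutrilio/usda_drink_scoring.py | _select_best_drink_match
-- ===== SOURCE A (Python) =====
-- from typing import Dict, List, Optional, Tuple
--
-- def _select_best_drink_match(drinks: List[Dict], search_term: str) -> Optional[Dict]:
--     """
--     Select the best drink match from search results.
--
--     Args:
--         drinks (List[Dict]): List of drink search results
--         search_term (str): Original search term
--
--     Returns:
--         Dict: Best matching drink item
--     """
--     if not drinks:
--         return None
--
--     # Prioritize by data type (same as ingredients)
--     priority_order = ['Foundation', 'SR Legacy', 'Survey (FNDDS)', 'Branded']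
--
--     for data_type in priority_order:
--         for drink in drinks:
--             if drink.get('dataType') == data_type:
--                 # Additional check for relevance
--                 description = drink.get('description', '').lower()
--                 if search_term.lower() in description:
--                     return drink
--
--     # If no priority match, return first result
--     return drinks[0]
-- ===== SOURCE B (Python) =====
-- def _select_best_drink_match(drinks, search_term):
--     if not drinks:
--         return None
--     ranks = {'Foundation': 0, 'SR Legacy': 1, 'Survey (FNDDS)': 2, 'Branded': 3}
--     term = search_term.lower()
--     best = None
--     best_rank = 4
--     for drink in drinks:
--         rank = ranks.get(drink.get('dataType'), 4)
--         if rank < best_rank and term in drink.get('description', '').lower():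
--             best = drink
--             best_rank = rank
--     return best if best is not None else drinks[0]
-- ===== Notes on version B (the rewrite author's own statement) =====
-- stated objective: simpler
-- what changed: Replaced the 4x nested rescan of the drinks list (one full pass per priority data type) by a single left-to-right pass that keeps the best candidate and its priority rank from a rank dictionary, with strict-improvement updates preserving A's tie-breaking.
import Mathlib
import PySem

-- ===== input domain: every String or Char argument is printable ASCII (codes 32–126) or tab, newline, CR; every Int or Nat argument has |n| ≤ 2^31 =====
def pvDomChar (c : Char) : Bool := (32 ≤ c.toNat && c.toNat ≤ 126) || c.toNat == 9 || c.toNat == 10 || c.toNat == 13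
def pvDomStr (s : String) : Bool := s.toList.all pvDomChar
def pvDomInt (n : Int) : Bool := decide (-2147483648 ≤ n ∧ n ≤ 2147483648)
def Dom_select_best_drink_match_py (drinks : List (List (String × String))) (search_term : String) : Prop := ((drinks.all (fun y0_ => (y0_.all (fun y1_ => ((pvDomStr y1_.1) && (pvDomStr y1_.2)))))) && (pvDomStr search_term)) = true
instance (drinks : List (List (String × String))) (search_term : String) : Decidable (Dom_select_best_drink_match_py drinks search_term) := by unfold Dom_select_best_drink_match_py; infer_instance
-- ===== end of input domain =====

-- B replaces A's four full rescans of the drinks list (one per priority data type)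
-- by a single pass keeping the best candidate and its priority rank (simpler, same results).


-- dict.get(key): first match in the association list (Python dicts have unique keys)
def pvGet : List (String × String) → String → Option String
  | [], _ => none
  | (k, v) :: rest, key => if k = key then some v else pvGet rest key

-- search_term.lower() in drink.get('description', '').lower()
def pvRelevant (d : List (String × String)) (term : String) : Bool :=
  PySem.Str.isIn (PySem.Str.lower term) (PySem.Str.lower ((pvGet d "description").getD ""))

-- ===== PORT A =====
def select_best_drink_match_py (drinks : List (List (String × String))) (search_term : String) : Option (List (String × String)) :=
  if drinks.isEmpty then none
  else
    match ["Foundation", "SR Legacy", "Survey (FNDDS)", "Branded"].findSome?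
        (fun dt => drinks.find? (fun d => pvGet d "dataType" == some dt && pvRelevant d search_term)) with
    | some d => some d
    | none => drinks.head?   -- drinks[0]; drinks is nonempty here

-- ===== PORT B =====
def pvRanks : PySem.Dict String Nat :=
  PySem.Dict.mk [("Foundation", 0), ("SR Legacy", 1), ("Survey (FNDDS)", 2), ("Branded", 3)]

-- ranks.get(drink.get('dataType'), 4)
def pvRankOf (d : List (String × String)) : Nat :=
  match pvGet d "dataType" with
  | some s => pvRanks.getD s 4
  | none => 4

def pvStep (term : String) (st : Option (List (String × String)) × Nat) (d : List (String × String)) :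
    Option (List (String × String)) × Nat :=
  let r := pvRankOf d
  if r < st.2 && pvRelevant d term then (some d, r) else st

def select_best_drink_match_py_alt (drinks : List (List (String × String))) (search_term : String) : Option (List (String × String)) :=
  if drinks.isEmpty then none
  else
    match (drinks.foldl (pvStep search_term) (none, 4)).1 with
    | some d => some d
    | none => drinks.head?

-- ===== PRECONDITION & SPEC =====
def Spec_select_best_drink_match_py (drinks : List (List (String × String))) (search_term : String) (out : Option (List (String × String))) : Prop := out = select_best_drink_match_py_alt drinks search_term
instance (drinks : List (List (String × String))) (search_term : String) (out : Option (List (String × String))) : Decidable (Spec_select_best_drink_match_py drinks search_term out) := by unfold Spec_select_best_drink_match_py; infer_instance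

-- ===== CLAIM (what is proved, stated in full; the proofs are below) =====
def Claim_equal_select_best_drink_match_py : Prop := ∀ (drinks : List (List (String × String))) (search_term : String), Dom_select_best_drink_match_py drinks search_term → Spec_select_best_drink_match_py drinks search_term (select_best_drink_match_py drinks search_term)

-- ===== LEMMAS AND PROOFS =====

-- first drink of rank < r that is relevant to term, ties broken by lower rank then list order
def pvBest (term : String) : Nat → List (List (String × String)) → Option (List (String × String))
  | 0, _ => none
  | r + 1, xs => (pvBest term r xs).or (xs.find? (fun d => pvRankOf d == r && pvRelevant d term))

theorem pvBest_nil (term : String) (r : Nat) : pvBest term r [] = none := by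
  induction r with
  | zero => rfl
  | succ r ih => simp [pvBest, ih]

theorem pvBest_cons_skip (term : String) (x : List (String × String))
    (xs : List (List (String × String))) (r : Nat)
    (h : ¬ (pvRankOf x < r ∧ pvRelevant x term = true)) :
    pvBest term r (x :: xs) = pvBest term r xs := by
  induction r with
  | zero => rfl
  | succ r ih =>
      have hx : (pvRankOf x == r && pvRelevant x term) = false := by
        by_cases ht : pvRelevant x term = true
        · have hne : pvRankOf x ≠ r := fun he => h ⟨by omega, ht⟩
          simp [hne]
        · simp [ht]
      have h' : ¬ (pvRankOf x < r ∧ pvRelevant x term = true) :=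
        fun hc => h ⟨by omega, hc.2⟩
      simp only [pvBest, List.find?_cons, hx, ih h']

theorem pvBest_cons_hit (term : String) (x : List (String × String))
    (xs : List (List (String × String))) (r : Nat)
    (hlt : pvRankOf x < r) (hrel : pvRelevant x term = true) :
    pvBest term r (x :: xs) = (pvBest term (pvRankOf x) xs).or (some x) := by
  induction r with
  | zero => omega
  | succ r ih =>
      by_cases he : pvRankOf x = r
      · have hskip : pvBest term r (x :: xs) = pvBest term r xs := by
          apply pvBest_cons_skip
          intro hc; omega
        simp only [pvBest, List.find?_cons, he]
        simp [hrel, hskip]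
      · have hlt' : pvRankOf x < r := by omega
        have hx : (pvRankOf x == r && pvRelevant x term) = false := by simp [he]
        simp only [pvBest, List.find?_cons, hx]
        have : List.find? (fun d => pvRankOf d == r && pvRelevant d term) (x :: xs) =
            List.find? (fun d => pvRankOf d == r && pvRelevant d term) xs := by
          simp [hx]
        rw [ih hlt', Option.or_assoc, Option.some_or]

theorem pvFold_eq_best (term : String) (xs : List (List (String × String)))
    (b : Option (List (String × String))) (r : Nat) :
    xs.foldl (pvStep term) (b, r) =
      (match pvBest term r xs with
       | some d => (some d, pvRankOf d)
       | none => (b, r)) := by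
  induction xs generalizing b r with
  | nil => rw [pvBest_nil]; rfl
  | cons x xs ih =>
      by_cases hc : (pvRankOf x < r ∧ pvRelevant x term = true)
      · have hcb : (pvRankOf x < r && pvRelevant x term) = true := by
          simp [hc.1, hc.2]
        simp only [List.foldl_cons, pvStep, hcb]
        rw [ih, pvBest_cons_hit term x xs r hc.1 hc.2]
        rcases hb : pvBest term (pvRankOf x) xs with _ | d <;> simp [hb, Option.or]
      · have hcb : (pvRankOf x < r && pvRelevant x term) = false := by
          by_cases h1 : pvRankOf x < r
          · have h2 : pvRelevant x term = false := by
              by_cases h2' : pvRelevant x term = true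
              · exact absurd ⟨h1, h2'⟩ hc
              · exact Bool.eq_false_iff.mpr h2'
            simp [h2]
          · simp [decide_eq_false h1]
        simp only [List.foldl_cons, pvStep, hcb, Bool.false_eq_true, if_false]
        rw [ih, pvBest_cons_skip term x xs r hc]

-- the rank test equals the dataType string test, for each of the four priority types
theorem pvRank_eq_iff (d : List (String × String)) (k : Nat) (dt : String)
    (hk : (k = 0 ∧ dt = "Foundation") ∨ (k = 1 ∧ dt = "SR Legacy") ∨
          (k = 2 ∧ dt = "Survey (FNDDS)") ∨ (k = 3 ∧ dt = "Branded")) :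
    (pvRankOf d == k) = (pvGet d "dataType" == some dt) := by
  rcases hg : pvGet d "dataType" with _ | s
  · rcases hk with ⟨h1, h2⟩ | ⟨h1, h2⟩ | ⟨h1, h2⟩ | ⟨h1, h2⟩ <;>
      simp [pvRankOf, hg, h1]
  · simp only [pvRankOf, hg]
    by_cases e0 : s = "Foundation"
    · subst e0
      rcases hk with ⟨h1, h2⟩ | ⟨h1, h2⟩ | ⟨h1, h2⟩ | ⟨h1, h2⟩ <;> subst h1 <;> subst h2 <;> decide
    · by_cases e1 : s = "SR Legacy"
      · subst e1
        rcases hk with ⟨h1, h2⟩ | ⟨h1, h2⟩ | ⟨h1, h2⟩ | ⟨h1, h2⟩ <;> subst h1 <;> subst h2 <;> decide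
      · by_cases e2 : s = "Survey (FNDDS)"
        · subst e2
          rcases hk with ⟨h1, h2⟩ | ⟨h1, h2⟩ | ⟨h1, h2⟩ | ⟨h1, h2⟩ <;> subst h1 <;> subst h2 <;> decide
        · by_cases e3 : s = "Branded"
          · subst e3
            rcases hk with ⟨h1, h2⟩ | ⟨h1, h2⟩ | ⟨h1, h2⟩ | ⟨h1, h2⟩ <;> subst h1 <;> subst h2 <;> decide
          · have hv : pvRanks.getD s 4 = 4 := by
              have n0 : ("Foundation" == s) = false := beq_eq_false_iff_ne.mpr (fun h => e0 h.symm)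
              have n1 : ("SR Legacy" == s) = false := beq_eq_false_iff_ne.mpr (fun h => e1 h.symm)
              have n2 : ("Survey (FNDDS)" == s) = false := beq_eq_false_iff_ne.mpr (fun h => e2 h.symm)
              have n3 : ("Branded" == s) = false := beq_eq_false_iff_ne.mpr (fun h => e3 h.symm)
              simp [pvRanks, PySem.Dict.getD, PySem.Dict.get?, n0, n1, n2, n3]
            rcases hk with ⟨h1, h2⟩ | ⟨h1, h2⟩ | ⟨h1, h2⟩ | ⟨h1, h2⟩ <;> subst h1 <;> subst h2 <;>
              simp [hv, e0, e1, e2, e3]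

theorem pvBest_four (term : String) (xs : List (List (String × String))) :
    pvBest term 4 xs =
      ["Foundation", "SR Legacy", "Survey (FNDDS)", "Branded"].findSome?
        (fun dt => xs.find? (fun d => pvGet d "dataType" == some dt && pvRelevant d term)) := by
  have f0 := fun d => pvRank_eq_iff d 0 "Foundation" (by tauto)
  have f1 := fun d => pvRank_eq_iff d 1 "SR Legacy" (by tauto)
  have f2 := fun d => pvRank_eq_iff d 2 "Survey (FNDDS)" (by tauto)
  have f3 := fun d => pvRank_eq_iff d 3 "Branded" (by tauto)
  have h0 : (fun d => pvRankOf d == 0 && pvRelevant d term) =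
      (fun d => pvGet d "dataType" == some "Foundation" && pvRelevant d term) := by
    funext d; rw [f0 d]
  have h1 : (fun d => pvRankOf d == 1 && pvRelevant d term) =
      (fun d => pvGet d "dataType" == some "SR Legacy" && pvRelevant d term) := by
    funext d; rw [f1 d]
  have h2 : (fun d => pvRankOf d == 2 && pvRelevant d term) =
      (fun d => pvGet d "dataType" == some "Survey (FNDDS)" && pvRelevant d term) := by
    funext d; rw [f2 d]
  have h3 : (fun d => pvRankOf d == 3 && pvRelevant d term) =
      (fun d => pvGet d "dataType" == some "Branded" && pvRelevant d term) := by
    funext d; rw [f3 d]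
  show ((((Option.none).or _).or _).or _).or _ = _
  simp only [h0, h1, h2, h3, Option.none_or]
  simp only [List.findSome?_cons, List.findSome?_nil]
  rcases xs.find? (fun d => pvGet d "dataType" == some "Foundation" && pvRelevant d term) with _ | a <;>
    rcases xs.find? (fun d => pvGet d "dataType" == some "SR Legacy" && pvRelevant d term) with _ | b <;>
      rcases xs.find? (fun d => pvGet d "dataType" == some "Survey (FNDDS)" && pvRelevant d term) with _ | c <;>
        rcases xs.find? (fun d => pvGet d "dataType" == some "Branded" && pvRelevant d term) with _ | e <;>
          simp [Option.or]

-- ===== VERDICT (by name: the statement is the Claim_ definition above) =====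
theorem select_best_drink_match_py_spec : Claim_equal_select_best_drink_match_py := by
  intro drinks term _
  show select_best_drink_match_py drinks term = select_best_drink_match_py_alt drinks term
  unfold select_best_drink_match_py select_best_drink_match_py_alt
  by_cases he : drinks.isEmpty
  · simp [he]
  · simp only [he]
    rw [pvFold_eq_best, ← pvBest_four]
    rcases pvBest term 4 drinks with _ | d <;> rfl
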